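-- pv_equiv track=rewrite | github.com/AndreBFarias/elden-ring-tracker | scripts/diagnose_block7.py | analyze_scattered
-- ===== SOURCE A (Python) =====
-- def analyze_scattered(active: list[int]) -> None:
--     regular_ranges = [
--         (7040, 7071),
--         (7080, 7111),
--         (7120, 7151),
--         (7160, 7191),
--         (7200, 7231),
--         (7240, 7271),
--         (7280, 7311),
--         (7320, 7351),
--         (7360, 7391),
--         (7400, 7431),
--         (7440, 7471),
--         (7480, 7511),
--         (7520, 7551),
--         (7560, 7591),
--         (7600, 7631),
--         (7640, 7671),
--         (7680, 7711),
--     ]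
--
--     def in_regular(flag_id: int) -> bool:
--         return any(lo <= flag_id <= hi for lo, hi in regular_ranges)
--
--     scattered = [f for f in active if not in_regular(f)]
--     return scattered
-- ===== SOURCE B (Python) =====
-- def analyze_scattered(active: list[int]) -> None:
--     # The 17 regular ranges are [7040+40k, 7071+40k] for k=0..16: closed-form test.
--     return [f for f in active if not (7040 <= f <= 7711 and (f - 7040) % 40 < 32)]
-- ===== Notes on version B (the rewrite author's own statement) =====
-- stated objective: simpler
-- what changed: Replaces the 17-entry range table and per-flag any-scan with a single closed-form arithmetic test (7040 <= f <= 7711 and (f-7040) % 40 < 32).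
import Mathlib
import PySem

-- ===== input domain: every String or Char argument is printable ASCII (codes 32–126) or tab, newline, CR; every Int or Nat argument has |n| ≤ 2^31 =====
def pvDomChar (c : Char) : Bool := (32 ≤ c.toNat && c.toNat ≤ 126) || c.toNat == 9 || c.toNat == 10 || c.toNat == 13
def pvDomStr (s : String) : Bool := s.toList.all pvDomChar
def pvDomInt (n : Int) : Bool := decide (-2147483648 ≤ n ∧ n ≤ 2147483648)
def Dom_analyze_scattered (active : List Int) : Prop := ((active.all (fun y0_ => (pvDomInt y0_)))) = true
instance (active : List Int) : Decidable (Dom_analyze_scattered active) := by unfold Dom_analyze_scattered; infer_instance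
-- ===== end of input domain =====

-- B replaces A's 17-entry range table and any-scan with one closed-form arithmetic test (objective: simpler).
-- ===== PORT A =====
def pvRegularRanges : List (Int × Int) :=
  [(7040, 7071), (7080, 7111), (7120, 7151), (7160, 7191), (7200, 7231),
   (7240, 7271), (7280, 7311), (7320, 7351), (7360, 7391), (7400, 7431),
   (7440, 7471), (7480, 7511), (7520, 7551), (7560, 7591), (7600, 7631),
   (7640, 7671), (7680, 7711)]

def pvInRegular (flag_id : Int) : Bool :=
  pvRegularRanges.any (fun p => decide (p.1 ≤ flag_id ∧ flag_id ≤ p.2))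

def analyze_scattered (active : List Int) : List Int :=
  active.filter (fun f => !(pvInRegular f))

-- ===== PORT B =====
def analyze_scattered_alt (active : List Int) : List Int :=
  active.filter (fun f =>
    !(decide (7040 ≤ f ∧ f ≤ 7711) && decide (PySem.Int.mod (f - 7040) 40 < 32)))

-- ===== PRECONDITION & SPEC =====
def Spec_analyze_scattered (active : List Int) (out : List Int) : Prop := out = analyze_scattered_alt active
instance (active : List Int) (out : List Int) : Decidable (Spec_analyze_scattered active out) := by unfold Spec_analyze_scattered; infer_instance

-- ===== CLAIM (what is proved, stated in full; the proofs are below) =====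
def Claim_equal_analyze_scattered : Prop := ∀ (active : List Int), Dom_analyze_scattered active → Spec_analyze_scattered active (analyze_scattered active)

-- ===== LEMMAS AND PROOFS =====

-- ===== VERDICT (by name: the statement is the Claim_ definition above) =====
theorem pvPointwise (f : Int) :
    (!(pvInRegular f)) = (!(decide (7040 ≤ f ∧ f ≤ 7711) && decide (PySem.Int.mod (f - 7040) 40 < 32))) := by
  have hm : PySem.Int.mod (f - 7040) 40 = (f - 7040) % 40 :=
    PySem.Int.mod_eq_emod_of_pos (by norm_num)
  apply congrArg
  rw [Bool.eq_iff_iff]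
  simp only [pvInRegular, pvRegularRanges, List.any_cons, List.any_nil, hm,
    Bool.or_eq_true, Bool.and_eq_true, decide_eq_true_eq, Bool.false_eq_true, or_false]
  constructor
  · rintro (h|h|h|h|h|h|h|h|h|h|h|h|h|h|h|h|h) <;> exact ⟨by omega, by omega⟩
  · rintro ⟨h1, h2⟩
    omega

theorem analyze_scattered_spec : Claim_equal_analyze_scattered := by
  intro active _
  unfold Spec_analyze_scattered analyze_scattered analyze_scattered_alt
  exact List.filter_congr (fun f _ => pvPointwise f)
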